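-- pv_equiv track=rewrite | github.com/LeroyK111/BasicAlgorithmSet | 代码实现算法/SwapNodesinPairs.py | demo
-- ===== SOURCE A (Python) =====
-- def demo(data: list) -> list:
--     result = []
--     for index, value in enumerate(data):
--         if index % 2 == 0:
--             if len(data) - 1 >= index + 1:
--                 result.extend([data[index + 1], value])
--             else:
--                 result.append(value)
--
--     return result
-- ===== SOURCE B (Python) =====
-- def demo(data: list) -> list:
--     evens = data[0::2]
--     odds = data[1::2]
--     result = []
--     for o, e in zip(odds, evens):
--         result.extend([o, e])
--     if len(odds) < len(evens):
--         result.append(evens[-1])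
--     return result
-- ===== Notes on version B (the rewrite author's own statement) =====
-- stated objective: alternative
-- what changed: Replaces the parity-filtered index scan with conditional lookahead by an up-front partition into the two strided slices data[0::2] and data[1::2], then a zip that interleaves odd-then-even, appending the unpaired final even element for odd-length input.
import Mathlib
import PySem

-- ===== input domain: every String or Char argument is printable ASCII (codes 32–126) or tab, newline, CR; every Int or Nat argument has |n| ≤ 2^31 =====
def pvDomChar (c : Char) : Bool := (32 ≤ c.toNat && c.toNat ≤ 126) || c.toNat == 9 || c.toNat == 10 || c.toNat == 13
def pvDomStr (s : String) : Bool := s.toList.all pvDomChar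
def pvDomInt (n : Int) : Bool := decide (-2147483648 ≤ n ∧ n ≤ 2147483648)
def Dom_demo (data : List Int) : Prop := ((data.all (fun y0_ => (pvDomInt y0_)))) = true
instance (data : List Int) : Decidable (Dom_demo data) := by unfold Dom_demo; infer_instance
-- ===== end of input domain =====

-- B partitions the list into the two strided slices data[0::2] / data[1::2] and interleaves them with a zip,
-- instead of A's parity-filtered index scan with conditional lookahead (alternative decomposition, same cost).


-- ===== PORT A =====
-- loop body of A: for index, value in enumerate(data): if index % 2 == 0: …
-- (data[index+1] is only read under the guard len(data)-1 >= index+1, so the pyGetD default is never used)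
def demoBody (data : List Int) (result : List Int) (p : Int × Int) : List Int :=
  if PySem.Int.mod p.1 2 = 0 then
    if PySem.List.len data - 1 ≥ p.1 + 1 then
      result ++ [PySem.List.pyGetD data (p.1 + 1) 0, p.2]
    else
      result ++ [p.2]
  else result

def demo (data : List Int) : List Int :=
  (PySem.List.enumerate data 0).foldl (demoBody data) []

-- ===== PORT B =====
-- data[0::2] / data[1::2]: slice? is none only for step 0, so .getD [] is exact here
def demo_alt (data : List Int) : List Int :=
  let evens := (PySem.List.slice? data (some 0) none 2).getD []
  let odds := (PySem.List.slice? data (some 1) none 2).getD []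
  let result := (odds.zip evens).foldl (fun r p => r ++ [p.1, p.2]) []
  if PySem.List.len odds < PySem.List.len evens then
    result ++ [PySem.List.pyGetD evens (-1) 0]   -- evens[-1]; the guard makes evens nonempty
  else result

-- ===== PRECONDITION & SPEC =====
def Spec_demo (data : List Int) (out : List Int) : Prop := out = demo_alt data
instance (data : List Int) (out : List Int) : Decidable (Spec_demo data out) := by unfold Spec_demo; infer_instance

-- ===== CLAIM (what is proved, stated in full; the proofs are below) =====
def Claim_equal_demo : Prop := ∀ (data : List Int), Dom_demo data → Spec_demo data (demo data)

-- ===== LEMMAS AND PROOFS =====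

-- the common value of both programs: swap in pairs, structurally
def sw : List Int → List Int
  | [] => []
  | [a] => [a]
  | a :: b :: r => b :: a :: sw r

-- every other element, starting at the head
def stride2 : List Int → List Int
  | [] => []
  | [a] => [a]
  | a :: _ :: r => a :: stride2 r

lemma stride2_len (xs : List Int) : (stride2 xs).length = (xs.length + 1) / 2 := by
  induction xs using stride2.induct with
  | case1 => simp [stride2]
  | case2 a => simp [stride2]
  | case3 a b r ih => simp only [stride2, List.length_cons, ih]; omega

lemma filterMap_stride (xs : List Int) :
    List.filterMap (fun k : Nat => xs[2 * k]?) (List.range ((xs.length + 1) / 2)) = stride2 xs := by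
  induction xs using stride2.induct with
  | case1 => simp [stride2]
  | case2 a => simp [stride2]
  | case3 a b r ih =>
      have hlen : ((a :: b :: r).length + 1) / 2 = (r.length + 1) / 2 + 1 := by
        simp only [List.length_cons]; omega
      rw [hlen, List.range_succ_eq_map, List.filterMap_cons, List.filterMap_map]
      have hfun : ((fun k : Nat => (a :: b :: r)[2 * k]?) ∘ Nat.succ) = (fun k : Nat => r[2 * k]?) := by
        funext k
        show (a :: b :: r)[2 * (k + 1)]? = r[2 * k]?
        rw [show 2 * (k + 1) = 2 * k + 1 + 1 by ring]
        simp [List.getElem?_cons_succ]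
      rw [hfun, ih]
      rfl

-- xs[0::2] is every other element from the head
lemma slice2_zero (xs : List Int) :
    PySem.List.slice? xs (some 0) none 2 = some (stride2 xs) := by
  simp only [PySem.List.slice?, PySem.List.sliceIndices]
  norm_num
  rcases xs with _ | ⟨a, t⟩
  · simp [stride2]
  · rw [if_pos (by simp)]
    have hcnt : ((((a :: t).length : ℤ) + 2 - 1) / 2).toNat = ((a :: t).length + 1) / 2 := by
      simp only [List.length_cons]; omega
    rw [hcnt, ← filterMap_stride (a :: t)]
    apply List.filterMap_congr
    intro k _
    have h2 : ((2 : ℤ) * (k : ℤ)).toNat = 2 * k := by omega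
    rw [h2]

-- xs[1::2] is every other element from the second position
lemma slice2_one (xs : List Int) :
    PySem.List.slice? xs (some 1) none 2 = some (stride2 xs.tail) := by
  simp only [PySem.List.slice?, PySem.List.sliceIndices]
  norm_num
  rcases xs with _ | ⟨a, t⟩
  · simp [stride2]
  · have hmin : min (1 : ℤ) ((a :: t).length : ℤ) = 1 := by simp
    rw [hmin]
    rcases t with _ | ⟨b, u⟩
    · simp [stride2]
    · rw [if_pos (by simp)]
      have hcnt : ((((a :: b :: u).length : ℤ) - 1 + 2 - 1) / 2).toNat = ((b :: u).length + 1) / 2 := by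
        simp only [List.length_cons]; omega
      rw [hcnt]
      show _ = stride2 (b :: u)
      rw [← filterMap_stride (b :: u)]
      apply List.filterMap_congr
      intro k _
      have h2 : ((1 : ℤ) + 2 * (k : ℤ)).toNat = 2 * k + 1 := by omega
      rw [h2]
      show (a :: b :: u)[2 * k + 1]? = (b :: u)[2 * k]?
      simp [List.getElem?_cons_succ]

-- A's loop body only appends to the accumulator
lemma body_acc (data : List Int) (l : List (Int × Int)) (acc : List Int) :
    l.foldl (demoBody data) acc = acc ++ l.foldl (demoBody data) [] := by
  induction l generalizing acc with
  | nil => simp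
  | cons p l ih =>
      rw [List.foldl_cons, List.foldl_cons, ih, ih (demoBody data [] p)]
      have h : demoBody data acc p = acc ++ demoBody data [] p := by
        unfold demoBody; split_ifs <;> simp
      rw [h, List.append_assoc]

-- shifting the whole frame by two: folding A's body for a::b::d over indices k+2,…
-- equals folding it for d over indices k,…
lemma body_shift (a b : Int) (d : List Int) (suf : List Int) :
    ∀ (k : Nat) (acc : List Int),
      (PySem.List.enumerate suf ((k : Int) + 2)).foldl (demoBody (a :: b :: d)) acc
        = (PySem.List.enumerate suf (k : Int)).foldl (demoBody d) acc := by
  induction suf with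
  | nil => intro k acc; simp [PySem.List.enumerate]
  | cons x s ih =>
      intro k acc
      rw [PySem.List.enumerate_cons, PySem.List.enumerate_cons, List.foldl_cons, List.foldl_cons]
      have hm : PySem.Int.mod ((k : Int) + 2) 2 = PySem.Int.mod (k : Int) 2 := by
        have a1 := PySem.Int.mod_natCast (k + 2) 2
        have a2 := PySem.Int.mod_natCast k 2
        have hn : (k + 2) % 2 = k % 2 := by omega
        rw [hn] at a1
        have := a1.trans a2.symm
        push_cast at this
        exact this
      have hc : (PySem.List.len (a :: b :: d) - 1 ≥ (k : Int) + 2 + 1) ↔ (PySem.List.len d - 1 ≥ (k : Int) + 1) := by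
        simp only [PySem.List.len_eq, List.length_cons]
        push_cast
        omega
      have hg : PySem.List.pyGetD (a :: b :: d) ((k : Int) + 2 + 1) 0 = PySem.List.pyGetD d ((k : Int) + 1) 0 := by
        have e1 : ((k : Int) + 2 + 1) = ((k + 3 : Nat) : Int) := by push_cast; ring
        have e2 : ((k : Int) + 1) = ((k + 1 : Nat) : Int) := by push_cast; ring
        rw [e1, e2, PySem.List.pyGetD_natCast, PySem.List.pyGetD_natCast]
        simp only [List.getD]
        rw [show k + 3 = (k + 1) + 1 + 1 by omega]
        simp [List.getElem?_cons_succ]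
      have h1 : demoBody (a :: b :: d) acc ((k : Int) + 2, x) = demoBody d acc ((k : Int), x) := by
        show (if PySem.Int.mod ((k : Int) + 2) 2 = 0 then
                if PySem.List.len (a :: b :: d) - 1 ≥ (k : Int) + 2 + 1 then
                  acc ++ [PySem.List.pyGetD (a :: b :: d) ((k : Int) + 2 + 1) 0, x]
                else acc ++ [x]
              else acc)
            = (if PySem.Int.mod (k : Int) 2 = 0 then
                if PySem.List.len d - 1 ≥ (k : Int) + 1 then
                  acc ++ [PySem.List.pyGetD d ((k : Int) + 1) 0, x]
                else acc ++ [x]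
              else acc)
        rw [hm, hg]
        by_cases hmod : PySem.Int.mod (k : Int) 2 = 0
        · rw [if_pos hmod, if_pos hmod]
          by_cases h2 : PySem.List.len d - 1 ≥ (k : Int) + 1
          · rw [if_pos h2, if_pos (hc.mpr h2)]
          · rw [if_neg h2, if_neg (fun hh => h2 (hc.mp hh))]
        · rw [if_neg hmod, if_neg hmod]
      rw [h1]
      have e1 : (k : Int) + 2 + 1 = ((k + 1 : Nat) : Int) + 2 := by push_cast; ring
      have e2 : (k : Int) + 1 = ((k + 1 : Nat) : Int) := by push_cast; ring
      rw [e1, e2, ih (k + 1)]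

lemma demo_cons_cons (a b : Int) (r : List Int) :
    demo (a :: b :: r) = b :: a :: demo r := by
  unfold demo
  rw [PySem.List.enumerate_cons, PySem.List.enumerate_cons, List.foldl_cons, List.foldl_cons]
  have h0 : demoBody (a :: b :: r) [] (0, a) = [b, a] := by
    show (if PySem.Int.mod 0 2 = 0 then
            if PySem.List.len (a :: b :: r) - 1 ≥ 0 + 1 then
              [] ++ [PySem.List.pyGetD (a :: b :: r) (0 + 1) 0, a]
            else [] ++ [a]
          else []) = [b, a]
    rw [if_pos (by decide), if_pos (by simp only [PySem.List.len_eq, List.length_cons]; push_cast; omega)]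
    norm_num [PySem.List.pyGetD_ofNat']
  have h1 : demoBody (a :: b :: r) [b, a] (0 + 1, b) = [b, a] := by
    show (if PySem.Int.mod (0 + 1) 2 = 0 then _ else [b, a]) = [b, a]
    rw [if_neg (by decide)]
  rw [h0, h1]
  rw [show (0 : ℤ) + 1 + 1 = ((0 : Nat) : Int) + 2 by norm_num]
  rw [body_shift a b r r 0]
  rw [body_acc]
  norm_num

lemma demo_eq_sw (data : List Int) : demo data = sw data := by
  induction data using sw.induct with
  | case1 => rfl
  | case2 a =>
      show demoBody [a] [] (0, a) = [a]
      show (if PySem.Int.mod 0 2 = 0 then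
              if PySem.List.len [a] - 1 ≥ 0 + 1 then
                [] ++ [PySem.List.pyGetD [a] (0 + 1) 0, a]
              else [] ++ [a]
            else []) = [a]
      rw [if_pos (by decide), if_neg (by simp [PySem.List.len_eq])]
      rfl
  | case3 a b r ih => rw [demo_cons_cons, ih, sw]

-- B after the two slice characterisations: its zip-and-append pass on the two strided lists
def core (o e : List Int) : List Int :=
  let result := (o.zip e).foldl (fun r p => r ++ [p.1, p.2]) []
  if PySem.List.len o < PySem.List.len e then
    result ++ [PySem.List.pyGetD e (-1) 0]
  else result

lemma alt_core (data : List Int) : demo_alt data = core (stride2 data.tail) (stride2 data) := by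
  unfold demo_alt core
  rw [slice2_zero, slice2_one]
  rfl

-- B's loop body only appends to the accumulator
lemma zip_acc (l : List (Int × Int)) (acc : List Int) :
    l.foldl (fun r (p : Int × Int) => r ++ [p.1, p.2]) acc
      = acc ++ l.foldl (fun r (p : Int × Int) => r ++ [p.1, p.2]) [] := by
  induction l generalizing acc with
  | nil => simp
  | cons p l ih =>
      rw [List.foldl_cons, List.foldl_cons, ih, ih ([] ++ [p.1, p.2])]
      simp

lemma core_cons (b a : Int) (o e : List Int) (h : o.length ≤ e.length) :
    core (b :: o) (a :: e) = b :: a :: core o e := by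
  unfold core
  simp only [List.zip_cons_cons, List.foldl_cons, PySem.List.len_eq, List.length_cons]
  rw [zip_acc]
  by_cases hlt : o.length < e.length
  · have he : e ≠ [] := by intro h0; subst h0; simp at hlt
    rw [if_pos (show ((o.length + 1 : ℕ) : ℤ) < ((e.length + 1 : ℕ) : ℤ) by push_cast; omega),
        if_pos (show ((o.length : ℕ) : ℤ) < ((e.length : ℕ) : ℤ) by omega)]
    rw [PySem.List.pyGetD_neg_one _ _ (by simp), PySem.List.pyGetD_neg_one _ _ he]
    rw [List.getLast_cons he]
    simp
  · rw [if_neg (show ¬ ((o.length + 1 : ℕ) : ℤ) < ((e.length + 1 : ℕ) : ℤ) by push_cast; omega),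
        if_neg (show ¬ ((o.length : ℕ) : ℤ) < ((e.length : ℕ) : ℤ) by omega)]
    simp

lemma alt_eq_sw (data : List Int) : demo_alt data = sw data := by
  rw [alt_core]
  induction data using sw.induct with
  | case1 => rfl
  | case2 a => rfl
  | case3 a b r ih =>
      show core (stride2 (b :: r)) (stride2 (a :: b :: r)) = sw (a :: b :: r)
      have hb : stride2 (b :: r) = b :: stride2 r.tail := by
        rcases r with _ | ⟨c, u⟩ <;> rfl
      rw [hb, show stride2 (a :: b :: r) = a :: stride2 r from rfl]
      rw [core_cons _ _ _ _ (by rw [stride2_len, stride2_len]; rcases r with _ | ⟨c, u⟩ <;> simp <;> omega)]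
      rw [ih, sw]

-- ===== VERDICT (by name: the statement is the Claim_ definition above) =====
theorem demo_spec : Claim_equal_demo := by
  intro data _
  unfold Spec_demo
  rw [demo_eq_sw, alt_eq_sw]
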